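-- pv_equiv track=rewrite | github.com/mbarnson/engrave | src/engrave/corpus/chunker.py | _generate_bar_boundaries
-- ===== SOURCE A (Python) =====
-- def _generate_bar_boundaries(ly_source: str, target_bars: int = 8) -> list[int]:
--     """Generate synthetic boundaries at bar-check positions for fixed-bar chunking.
--
--     When no structural boundaries exist, this function creates boundaries every
--     `target_bars` bar checks to produce chunks in the 4-8 bar range.
--
--     Args:
--         ly_source: LilyPond source text.
--         target_bars: Number of bars between synthetic boundaries.
--
--     Returns:
--         Sorted list of character positions for synthetic boundaries.
--     """
--     bar_positions: list[int] = []
--     in_string = False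
--     for i, ch in enumerate(ly_source):
--         if ch == '"':
--             in_string = not in_string
--         elif ch == "|" and not in_string:
--             bar_positions.append(i)
--
--     boundaries: list[int] = []
--     for j in range(target_bars, len(bar_positions), target_bars):
--         # Place the boundary right after the bar check
--         boundaries.append(bar_positions[j - 1] + 1)
--
--     return boundaries
-- ===== SOURCE B (Python) =====
-- def _generate_bar_boundaries(ly_source: str, target_bars: int = 8) -> list[int]:
--     """Single streaming pass: count unquoted bar checks and emit a boundary
--     every `target_bars` bars, holding each candidate until the next bar check
--     confirms another group follows."""
--     if target_bars <= 0:
--         return []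
--     boundaries: list[int] = []
--     in_string = False
--     count = 0
--     pending = None
--     for i, ch in enumerate(ly_source):
--         if ch == '"':
--             in_string = not in_string
--         elif ch == "|" and not in_string:
--             if pending is not None:
--                 boundaries.append(pending)
--                 pending = None
--             count += 1
--             if count % target_bars == 0:
--                 pending = i + 1
--     return boundaries
-- ===== Notes on version B (the rewrite author's own statement) =====
-- stated objective: alternative
-- what changed: Replaced A's two passes (materialise the full list of bar-check positions, then index it via range(target_bars, len, target_bars)) by one streaming loop that keeps only a bar counter and a single pending boundary, never building the positions list.
import Mathlib
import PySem

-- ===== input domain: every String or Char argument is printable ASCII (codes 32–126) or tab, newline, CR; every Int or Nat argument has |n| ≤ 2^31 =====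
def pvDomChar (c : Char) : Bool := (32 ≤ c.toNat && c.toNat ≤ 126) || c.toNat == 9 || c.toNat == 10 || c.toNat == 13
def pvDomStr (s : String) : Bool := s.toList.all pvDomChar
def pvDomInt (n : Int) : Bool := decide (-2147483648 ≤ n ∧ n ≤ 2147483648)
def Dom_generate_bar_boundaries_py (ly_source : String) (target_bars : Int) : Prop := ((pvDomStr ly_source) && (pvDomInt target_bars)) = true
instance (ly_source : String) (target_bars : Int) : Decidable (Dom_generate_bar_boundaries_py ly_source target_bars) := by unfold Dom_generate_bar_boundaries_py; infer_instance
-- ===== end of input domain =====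

-- B replaces A's two passes (collect the whole list of bar-check positions, then index
-- every target_bars-th of them) by one streaming pass that keeps only a bar counter and
-- one pending boundary; same return value.

-- ===== PORT A =====
-- the body of A's first for-loop (state: (in_string, bar_positions))
def pvStepA (st : Bool × List Int) (p : Int × Char) : Bool × List Int :=
  if p.2 = '"' then (!st.1, st.2)
  else if p.2 = '|' && !st.1 then (st.1, st.2 ++ [p.1])
  else st

def generate_bar_boundaries_py (ly_source : String) (target_bars : Int) : List Int :=
  let bar_positions := ((PySem.List.enumerate ly_source.toList 0).foldl pvStepA (false, [])).2
  -- bar_positions[j - 1]: always in range (target_bars ≤ j < len), so pyGetD with default 0 is exact here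
  (PySem.List.pyRange target_bars (bar_positions.length : Int) target_bars).foldl
    (fun acc j => acc ++ [PySem.List.pyGetD bar_positions (j - 1) 0 + 1]) []

-- ===== PORT B =====
-- the body of B's single for-loop (state: (in_string, count, pending, boundaries))
def pvStepB (t : Int) (st : Bool × Int × Option Int × List Int) (p : Int × Char) :
    Bool × Int × Option Int × List Int :=
  if p.2 = '"' then (!st.1, st.2)
  else if p.2 = '|' && !st.1 then
    let bnd := match st.2.2.1 with
      | some q => st.2.2.2 ++ [q]
      | none => st.2.2.2
    let count := st.2.1 + 1
    let pending := if PySem.Int.mod count t = 0 then some (p.1 + 1) else none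
    (st.1, count, pending, bnd)
  else st

def generate_bar_boundaries_py_alt (ly_source : String) (target_bars : Int) : List Int :=
  if target_bars ≤ 0 then []
  else
    ((PySem.List.enumerate ly_source.toList 0).foldl (pvStepB target_bars)
      (false, 0, none, [])).2.2.2

-- ===== PRECONDITION & SPEC =====
-- Pre_ excludes only target_bars = 0, where A's range(...) raises ValueError (zero step).
def Pre_generate_bar_boundaries_py (ly_source : String) (target_bars : Int) : Prop :=
  target_bars ≠ 0
instance (ly_source : String) (target_bars : Int) : Decidable (Pre_generate_bar_boundaries_py ly_source target_bars) := by unfold Pre_generate_bar_boundaries_py; infer_instance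

def pvWitness_generate_bar_boundaries_py : String × Int := ("a | b | c | d |", 2)

def Spec_generate_bar_boundaries_py (ly_source : String) (target_bars : Int) (out : List Int) : Prop := out = generate_bar_boundaries_py_alt ly_source target_bars
instance (ly_source : String) (target_bars : Int) (out : List Int) : Decidable (Spec_generate_bar_boundaries_py ly_source target_bars out) := by unfold Spec_generate_bar_boundaries_py; infer_instance

-- ===== CLAIM (what is proved, stated in full; the proofs are below) =====
def Claim_equal_generate_bar_boundaries_py : Prop := ∀ (ly_source : String) (target_bars : Int), Dom_generate_bar_boundaries_py ly_source target_bars → Pre_generate_bar_boundaries_py ly_source target_bars → Spec_generate_bar_boundaries_py ly_source target_bars (generate_bar_boundaries_py ly_source target_bars)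

-- ===== LEMMAS AND PROOFS =====

-- positions of unquoted '|' among the remaining enumerated characters (A's first loop, recursively)
def pvBars : List (Int × Char) → Bool → List Int
  | [], _ => []
  | (i, ch) :: rest, b =>
    if ch = '"' then pvBars rest (!b)
    else if ch = '|' && !b then i :: pvBars rest b
    else pvBars rest b

-- B's bar-level action replayed over a list of bar positions
def pvStepBars (t : Int) : List Int → Int → Option Int → List Int
  | [], _, _ => []
  | i :: rest, c, p =>
    (match p with | some q => [q] | none => []) ++
      pvStepBars t rest (c + 1) (if PySem.Int.mod (c + 1) t = 0 then some (i + 1) else none)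

-- one emission candidate per bar, regardless of whether a later bar follows
def pvFall (t : Int) : List Int → Int → List Int
  | [], _ => []
  | i :: rest, c => (if PySem.Int.mod (c + 1) t = 0 then [i + 1] else []) ++ pvFall t rest (c + 1)

theorem pvFoldA (l : List (Int × Char)) : ∀ (b : Bool) (acc : List Int),
    (l.foldl pvStepA (b, acc)).2 = acc ++ pvBars l b := by
  induction l with
  | nil => intro b acc; simp [pvBars]
  | cons hd tl ih =>
    intro b acc
    obtain ⟨i, ch⟩ := hd
    by_cases h1 : ch = '"'
    · simp [pvBars, pvStepA, h1, ih]
    · by_cases h2 : ch = '|' ∧ b = false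
      · simp [pvBars, pvStepA, h2.1, h2.2, ih]
      · rcases Bool.eq_false_or_eq_true b with hb | hb
        · simp [pvBars, pvStepA, h1, hb, ih]
        · have : ¬ ch = '|' := fun hc => h2 ⟨hc, hb⟩
          simp [pvBars, pvStepA, h1, this, hb, ih]

theorem pvFoldB (t : Int) (l : List (Int × Char)) : ∀ (b : Bool) (c : Int) (p : Option Int) (acc : List Int),
    (l.foldl (pvStepB t) (b, c, p, acc)).2.2.2 = acc ++ pvStepBars t (pvBars l b) c p := by
  induction l with
  | nil => intro b c p acc; simp [pvBars, pvStepBars]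
  | cons hd tl ih =>
    intro b c p acc
    obtain ⟨i, ch⟩ := hd
    by_cases h1 : ch = '"'
    · simp [pvBars, pvStepB, h1, ih]
    · rcases Bool.eq_false_or_eq_true b with hb | hb
      · simp [pvBars, pvStepB, h1, hb, ih]
      · by_cases h2 : ch = '|'
        · cases p <;>
            simp [pvBars, pvStepB, pvStepBars, h2, hb, ih]
        · simp [pvBars, pvStepB, h1, h2, hb, ih]

theorem pvStepBars_none (t : Int) (bp : List Int) : ∀ (c : Int),
    pvStepBars t bp c none = pvFall t bp.dropLast c := by
  induction bp with
  | nil => intro c; simp [pvStepBars, pvFall]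
  | cons x rest ih =>
    intro c
    cases rest with
    | nil => simp [pvStepBars, pvFall]
    | cons y rest' =>
      have ih' := ih (c + 1)
      simp only [pvStepBars, List.nil_append] at ih'
      by_cases h : PySem.Int.mod (c + 1) t = 0 <;>
        simp [pvStepBars, pvFall, h, ih']

theorem pvFall_snoc (t x : Int) (ys : List Int) : ∀ (c : Int),
    pvFall t (ys ++ [x]) c =
      pvFall t ys c ++ (if PySem.Int.mod (c + ys.length + 1) t = 0 then [x + 1] else []) := by
  induction ys with
  | nil => intro c; simp [pvFall]
  | cons y ys ih =>
    intro c
    have hc : (c + 1) + (ys.length : Int) + 1 = c + ((y :: ys).length : Int) + 1 := by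
      simp [List.length_cons]; ring
    simp only [List.cons_append, pvFall, ih (c + 1), hc, List.append_assoc]

theorem pvMod_zero_iff (t x : Int) (ht : 1 ≤ t) : PySem.Int.mod x t = 0 ↔ t ∣ x := by
  unfold PySem.Int.mod
  rw [Int.fmod_eq_emod]
  rw [if_pos (Or.inl (by omega))]
  simp only [add_zero]
  exact ⟨Int.dvd_of_emod_eq_zero, Int.emod_eq_zero_of_dvd⟩

theorem pvRange_closed (t b : Int) (ht : 1 ≤ t) :
    PySem.List.pyRange t b t = (List.range ((b - 1) / t).toNat).map (fun k : Nat => t + t * (k : Int)) := by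
  unfold PySem.List.pyRange
  rw [if_neg (by omega : ¬ t = 0)]
  simp only [if_pos (by omega : (0:Int) < t)]
  have he : b - t + t - 1 = b - 1 := by ring
  by_cases h : t < b
  · rw [if_pos h, he]
  · rw [if_neg h]
    have h0 : ((b - 1) / t).toNat = 0 := by
      by_cases hge : 0 ≤ b - 1
      · have := Int.ediv_eq_zero_of_lt hge (by omega : b - 1 < t)
        omega
      · have : (b - 1) / t < 0 := Int.ediv_neg_of_neg_of_pos (by omega) (by omega)
        omega
    rw [h0]

theorem pvRange_nil_of_neg (t L : Int) (ht : t < 0) (hL : 0 ≤ L) :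
    PySem.List.pyRange t L t = [] := by
  unfold PySem.List.pyRange
  rw [if_neg (by omega : ¬ t = 0)]
  simp only [if_neg (by omega : ¬ (0:Int) < t)]
  rw [if_neg (by omega : ¬ L < t)]
  simp

theorem pvGetD_append_left (ys : List Int) (x : Int) (i : Int) (h0 : 0 ≤ i) (h1 : i < (ys.length : Int)) :
    PySem.List.pyGetD (ys ++ [x]) i 0 = PySem.List.pyGetD ys i 0 := by
  rw [PySem.List.pyGetD_eq_getElem (ys ++ [x]) 0 (by omega) (by simp; omega),
      PySem.List.pyGetD_eq_getElem ys 0 h0 (by simpa using h1)]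
  rw [List.getElem_append_left (by omega)]

theorem pvRange_snoc (t b : Int) (ht : 1 ≤ t) (hb : 0 ≤ b) :
    PySem.List.pyRange t (b + 1) t =
      PySem.List.pyRange t b t ++ (if t ∣ b ∧ t ≤ b then [b] else []) := by
  rw [pvRange_closed t (b + 1) ht, pvRange_closed t b ht]
  simp only [add_sub_cancel_right]
  by_cases hd : t ∣ b ∧ t ≤ b
  · obtain ⟨⟨q, hq⟩, hle⟩ := hd
    have hq1 : 1 ≤ q := by nlinarith
    have h1 : b / t = q := by rw [hq, Int.mul_ediv_cancel_left _ (by omega)]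
    have h2 : (b - 1) / t = q - 1 := by
      have hbm : b - 1 = (t - 1) + t * (q - 1) := by rw [hq]; ring
      rw [hbm, Int.add_mul_ediv_left _ _ (by omega : t ≠ 0),
          Int.ediv_eq_zero_of_lt (by omega) (by omega)]
      ring
    rw [h1, h2]
    have h3 : q.toNat = (q - 1).toNat + 1 := by omega
    rw [h3, List.range_succ, List.map_append]
    rw [if_pos ⟨⟨q, hq⟩, hle⟩]
    simp only [List.map_cons, List.map_nil]
    congr 2
    have h4 : (((q - 1).toNat : Nat) : Int) = q - 1 := by omega
    rw [h4, hq]; ring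
  · rw [if_neg hd, List.append_nil]
    by_cases hdvd : t ∣ b
    · have hble : ¬ t ≤ b := fun h => hd ⟨hdvd, h⟩
      obtain ⟨q, hq⟩ := hdvd
      have hq0 : q = 0 := by nlinarith
      have hb0 : b = 0 := by rw [hq, hq0]; ring
      subst hb0
      have e1 : ((0:Int)) / t = 0 := Int.zero_ediv t
      have e2 : ((0:Int) - 1) / t < 0 := Int.ediv_neg_of_neg_of_pos (by omega) (by omega)
      have e1' : ((0:Int) / t).toNat = 0 := by omega
      have e2' : (((0:Int) - 1) / t).toNat = 0 := by omega
      rw [e1', e2']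
    · have hr0 : 0 ≤ b % t := Int.emod_nonneg b (by omega)
      have hrt : b % t < t := Int.emod_lt_of_pos b (by omega)
      have hr1 : b % t ≠ 0 := fun h => hdvd (Int.dvd_of_emod_eq_zero h)
      have hbe : t * (b / t) + b % t = b := Int.ediv_add_emod b t
      have h2 : (b - 1) / t = b / t := by
        have hbm : b - 1 = (b % t - 1) + t * (b / t) := by omega
        rw [hbm, Int.add_mul_ediv_left _ _ (by omega : t ≠ 0),
            Int.ediv_eq_zero_of_lt (by omega) (by omega)]
        ring
      rw [h2]

theorem pvMain (t : Int) (ht : 1 ≤ t) (ys : List Int) :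
    (PySem.List.pyRange t ((ys.length : Int) + 1) t).map
      (fun j => PySem.List.pyGetD ys (j - 1) 0 + 1) = pvFall t ys 0 := by
  induction ys using List.reverseRecOn with
  | nil => simp [pvRange_closed t 1 ht, pvFall]
  | append_singleton ys x ih =>
    have hlen : ((ys ++ [x]).length : Int) + 1 = ((ys.length : Int) + 1) + 1 := by
      simp
    rw [hlen, pvRange_snoc t _ ht (by positivity), List.map_append]
    have hfst : (PySem.List.pyRange t ((ys.length : Int) + 1) t).map
        (fun j => PySem.List.pyGetD (ys ++ [x]) (j - 1) 0 + 1) = pvFall t ys 0 := by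
      rw [← ih]
      apply List.map_congr_left
      intro j hj
      rw [PySem.List.mem_pyRange_iff_of_pos (by omega)] at hj
      rw [pvGetD_append_left ys x (j - 1) (by omega) (by omega)]
    rw [hfst, pvFall_snoc]
    congr 1
    have hpos : (0:Int) < (ys.length : Int) + 1 := by positivity
    by_cases hdvd : t ∣ ((ys.length : Int) + 1)
    · have hle : t ≤ (ys.length : Int) + 1 := Int.le_of_dvd hpos hdvd
      rw [if_pos ⟨hdvd, hle⟩, if_pos (by rw [pvMod_zero_iff _ _ ht]; simpa using hdvd)]
      simp only [List.map_cons, List.map_nil]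
      congr 2
      rw [PySem.List.pyGetD_eq_getElem (ys ++ [x]) 0 (by omega) (by simp)]
      simp
    · rw [if_neg (fun h => hdvd h.1), if_neg (by rw [pvMod_zero_iff _ _ ht]; simpa using hdvd)]
      rfl

-- A on positive target_bars, expressed through pvFall
theorem pvASide (t : Int) (ht : 1 ≤ t) (bp : List Int) :
    (PySem.List.pyRange t (bp.length : Int) t).map
      (fun j => PySem.List.pyGetD bp (j - 1) 0 + 1) = pvFall t bp.dropLast 0 := by
  induction bp using List.reverseRecOn with
  | nil =>
    rw [pvRange_closed t _ ht]
    have hneg : (-1:Int) / t < 0 := Int.ediv_neg_of_neg_of_pos (by omega) (by omega)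
    have h0 : (((List.length ([]:List Int) : Int) - 1) / t).toNat = 0 := by
      simp only [List.length_nil, Nat.cast_zero, zero_sub]
      omega
    rw [h0]
    simp [pvFall]
  | append_singleton ys x _ =>
    have hlen : (((ys ++ [x]).length : Int)) = (ys.length : Int) + 1 := by simp
    rw [hlen, List.dropLast_concat, ← pvMain t ht ys]
    apply List.map_congr_left
    intro j hj
    rw [PySem.List.mem_pyRange_iff_of_pos (by omega)] at hj
    rw [pvGetD_append_left ys x (j - 1) (by omega) (by omega)]

-- ===== VERDICT (by name: the statement is the Claim_ definition above) =====
theorem generate_bar_boundaries_py_spec : Claim_equal_generate_bar_boundaries_py := by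
  intro ly_source target_bars _ hpre
  unfold Spec_generate_bar_boundaries_py
  unfold generate_bar_boundaries_py generate_bar_boundaries_py_alt
  simp only []
  rw [pvFoldA, List.nil_append]
  by_cases ht : target_bars ≤ 0
  · have htneg : target_bars < 0 := by
      rcases lt_or_eq_of_le ht with h | h
      · exact h
      · exact absurd h hpre
    rw [if_pos ht, pvRange_nil_of_neg _ _ htneg (by positivity)]
    simp
  · rw [if_neg ht, pvFoldB, List.nil_append, pvStepBars_none,
        PySem.List.foldl_append_singleton_eq_map
          (fun j => PySem.List.pyGetD (pvBars (PySem.List.enumerate ly_source.toList 0) false) (j - 1) 0 + 1),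
        List.nil_append]
    exact pvASide target_bars (by omega) _
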